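-- pv_equiv track=rewrite | github.com/amoghthusoo/LeetCode | Reverse_Letters_Then_Special_Characters_in_a_String.py | reverseByType
-- ===== SOURCE A (Python) =====
-- def reverseByType(s: str) -> str:
--
--     letter_indices = []
--     letters = []
--
--     special_indices = []
--     special = []
--
--     for i, e in enumerate(s):
--         if(e.isalpha()):
--             letter_indices.append(i)
--             letters.append(e)
--
--         else:
--             special_indices.append(i)
--             special.append(e)
--
--     letters.reverse()
--     special.reverse()
--
--     intr_arr = [None for _ in range(len(s))]
--
--     while(letter_indices):
--         intr_arr[letter_indices.pop(0)] = letters.pop(0)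
--
--     while(special_indices):
--         intr_arr[special_indices.pop(0)] = special.pop(0)
--
--     return "".join(intr_arr)
-- ===== SOURCE B (Python) =====
-- def reverseByType(s: str) -> str:
--     chars = list(s)
--
--     def two_pointer_pass(skip):
--         # in-place: swap the non-skipped chars inward from both ends
--         i, j = 0, len(chars) - 1
--         while i < j:
--             if skip(chars[i]):
--                 i += 1
--             elif skip(chars[j]):
--                 j -= 1
--             else:
--                 chars[i], chars[j] = chars[j], chars[i]
--                 i += 1
--                 j -= 1
--
--     two_pointer_pass(lambda c: not c.isalpha())  # reverse the letters in place
--     two_pointer_pass(str.isalpha)                # reverse the specials in place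
--     return "".join(chars)
-- ===== Notes on version B (the rewrite author's own statement) =====
-- stated objective: faster
-- what changed: Replaces A's four index/value lists, None-filled buffer and two quadratic pop(0) scatter loops by two in-place two-pointer passes that swap letters (then specials) inward from both ends, maintaining only the char list and two indices.
import Mathlib
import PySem

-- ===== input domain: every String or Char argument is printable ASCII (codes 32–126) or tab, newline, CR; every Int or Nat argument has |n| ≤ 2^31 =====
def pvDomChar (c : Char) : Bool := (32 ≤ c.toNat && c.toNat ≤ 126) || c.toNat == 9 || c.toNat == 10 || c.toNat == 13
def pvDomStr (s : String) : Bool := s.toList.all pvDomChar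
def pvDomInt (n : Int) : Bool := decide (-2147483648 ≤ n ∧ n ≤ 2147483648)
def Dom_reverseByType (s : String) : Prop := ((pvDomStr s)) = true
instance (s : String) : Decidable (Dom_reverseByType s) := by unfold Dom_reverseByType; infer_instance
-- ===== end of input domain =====

-- B replaces A's four index/value lists, None buffer and two quadratic pop(0) scatter loops by
-- two in-place two-pointer swap passes over the char list (objective: faster, measured).

-- ===== PORT A =====
-- the enumerate loop: four append-accumulators (letter_indices, letters, special_indices, special)
def pvCollect (ps : List (Int × Char)) : List Int × List Char × List Int × List Char :=
  ps.foldl (fun acc p =>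
    if PySem.Chars.isalpha p.2 then
      (acc.1 ++ [p.1], acc.2.1 ++ [p.2], acc.2.2.1, acc.2.2.2)
    else
      (acc.1, acc.2.1, acc.2.2.1 ++ [p.1], acc.2.2.2 ++ [p.2])) ([], [], [], [])

-- the 'while(indices): intr_arr[indices.pop(0)] = values.pop(0)' loop (indices come from
-- enumerate, hence are ≥ 0, so .toNat is exact; the loops always pop both lists in step)
def pvFill : List Int → List Char → List (Option Char) → List (Option Char)
  | i :: is, v :: vs, arr => pvFill is vs (arr.set i.toNat (some v))
  | _, _, arr => arr

def reverseByType (s : String) : String :=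
  let cs := s.toList
  let col := pvCollect (PySem.List.enumerate cs 0)
  let letterIdx := col.1
  let letters := col.2.1
  let specIdx := col.2.2.1
  let specials := col.2.2.2
  let arr0 := List.replicate cs.length (none : Option Char)
  let arr1 := pvFill letterIdx letters.reverse arr0
  let arr2 := pvFill specIdx specials.reverse arr1
  -- "".join(intr_arr): every slot has been filled, so the None case never occurs
  String.mk (arr2.filterMap id)

-- ===== PORT B =====
-- the inner 'while i < j' two-pointer loop of two_pointer_pass: skip from the left, skip from
-- the right, else swap chars[i] and chars[j] and move both inward.  i and j always lie in range
-- in the Python (i < j ≤ len-1), so List.getD's default ' ' is never the value read.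
def pvPass (skip : Char → Bool) (arr : List Char) (i j : Nat) : List Char :=
  if i < j then
    if skip (arr.getD i ' ') then pvPass skip arr (i + 1) j
    else if skip (arr.getD j ' ') then pvPass skip arr i (j - 1)
    else pvPass skip ((arr.set i (arr.getD j ' ')).set j (arr.getD i ' ')) (i + 1) (j - 1)
  else arr
termination_by j - i

def reverseByType_alt (s : String) : String :=
  let cs := s.toList
  let cs1 := pvPass (fun c => !PySem.Chars.isalpha c) cs 0 (cs.length - 1)
  let cs2 := pvPass (fun c => PySem.Chars.isalpha c) cs1 0 (cs1.length - 1)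
  String.mk cs2

-- ===== PRECONDITION & SPEC =====
def Spec_reverseByType (s : String) (out : String) : Prop := out = reverseByType_alt s
instance (s : String) (out : String) : Decidable (Spec_reverseByType s out) := by unfold Spec_reverseByType; infer_instance

-- ===== CLAIM (what is proved, stated in full; the proofs are below) =====
def Claim_equal_reverseByType : Prop := ∀ (s : String), Dom_reverseByType s → Spec_reverseByType s (reverseByType s)

-- ===== LEMMAS AND PROOFS =====

-- canonical form both ports are reduced to: letters replaced by the reversed letters, specials
-- by the reversed specials, in one structural merge
def pvMerge : List Char → List Char → List Char → List Char
  | [], _, _ => []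
  | c :: cs, ls, ss =>
    if PySem.Chars.isalpha c then
      match ls with
      | l :: ls' => l :: pvMerge cs ls' ss
      | [] => []
    else
      match ss with
      | v :: ss' => v :: pvMerge cs ls ss'
      | [] => []

-- replace the q-chars of the list by successive elements of rs, keep the rest in place
def pvSub (q : Char → Bool) : List Char → List Char → List Char
  | [], _ => []
  | c :: cs, rs =>
    if q c then
      match rs with
      | r :: rs' => r :: pvSub q cs rs'
      | [] => c :: pvSub q cs []
    else c :: pvSub q cs rs

-- positions (as Ints) of the chars satisfying q, relative to the head of the list
def pvIdxs (q : Char → Bool) : List Char → List Int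
  | [] => []
  | c :: cs => if q c then 0 :: (pvIdxs q cs).map (· + 1) else (pvIdxs q cs).map (· + 1)

theorem pvIdxs_nonneg (q : Char → Bool) (cs : List Char) :
    ∀ i ∈ pvIdxs q cs, 0 ≤ i := by
  induction cs with
  | nil => simp [pvIdxs]
  | cons c cs ih =>
    intro i hi
    simp only [pvIdxs] at hi
    split at hi
    · rcases List.mem_cons.1 hi with h | h
      · omega
      · rcases List.mem_map.1 h with ⟨j, hj, rfl⟩; have := ih j hj; omega
    · rcases List.mem_map.1 hi with ⟨j, hj, rfl⟩; have := ih j hj; omega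

theorem pvCollect_spec (ps : List (Int × Char)) (a c : List Int) (b d : List Char) :
    ps.foldl (fun acc p =>
      if PySem.Chars.isalpha p.2 then
        (acc.1 ++ [p.1], acc.2.1 ++ [p.2], acc.2.2.1, acc.2.2.2)
      else
        (acc.1, acc.2.1, acc.2.2.1 ++ [p.1], acc.2.2.2 ++ [p.2])) (a, b, c, d)
    = (a ++ (ps.filter (fun p => PySem.Chars.isalpha p.2)).map (·.1),
       b ++ (ps.filter (fun p => PySem.Chars.isalpha p.2)).map (·.2),
       c ++ (ps.filter (fun p => !PySem.Chars.isalpha p.2)).map (·.1),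
       d ++ (ps.filter (fun p => !PySem.Chars.isalpha p.2)).map (·.2)) := by
  induction ps generalizing a b c d with
  | nil => simp
  | cons p ps ih =>
    by_cases hp : PySem.Chars.isalpha p.2
    · simp [List.foldl_cons, hp, ih, List.append_assoc]
    · simp [List.foldl_cons, hp, ih, List.append_assoc]

theorem pvEnum_idx (q : Char → Bool) (cs : List Char) (k : Int) :
    ((PySem.List.enumerate cs k).filter (fun p => q p.2)).map (·.1)
      = (pvIdxs q cs).map (· + k) := by
  induction cs generalizing k with
  | nil => simp [PySem.List.enumerate_nil, pvIdxs]
  | cons c cs ih =>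
    simp only [PySem.List.enumerate_cons, pvIdxs]
    by_cases hq : q c
    · simp only [List.filter_cons, hq, if_pos, List.map_cons, ih, List.map_map,
        List.cons.injEq]
      refine ⟨by omega, List.map_congr_left fun x _ => ?_⟩
      simp only [Function.comp_apply]; omega
    · simp only [List.filter_cons, hq, Bool.false_eq_true, if_neg, not_false_iff, ih,
        List.map_map]
      refine List.map_congr_left fun x _ => ?_
      simp only [Function.comp_apply]; omega

theorem pvEnum_val (q : Char → Bool) (cs : List Char) (k : Int) :
    ((PySem.List.enumerate cs k).filter (fun p => q p.2)).map (·.2)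
      = cs.filter q := by
  induction cs generalizing k with
  | nil => simp [PySem.List.enumerate_nil]
  | cons c cs ih =>
    simp only [PySem.List.enumerate_cons, List.filter_cons]
    by_cases hq : q c <;> simp [hq, ih]

theorem pvFill_shift (is : List Int) (vs : List Char) (x : Option Char)
    (arr : List (Option Char)) (h : ∀ i ∈ is, 0 ≤ i) :
    pvFill (is.map (· + 1)) vs (x :: arr) = x :: pvFill is vs arr := by
  induction is generalizing vs arr with
  | nil => cases vs <;> simp [pvFill]
  | cons i is ih =>
    cases vs with
    | nil => simp [pvFill]
    | cons v vs =>
      have hi : 0 ≤ i := h i (List.mem_cons_self ..)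
      have ht : (i + 1).toNat = i.toNat + 1 := by omega
      simp only [List.map_cons, pvFill, ht, List.set_cons_succ]
      exact ih vs _ (fun j hj => h j (List.mem_cons_of_mem _ hj))

theorem pvMain (cs ls ss : List Char)
    (hl : ls.length = (cs.filter PySem.Chars.isalpha).length)
    (hs : ss.length = (cs.filter (fun c => !PySem.Chars.isalpha c)).length) :
    pvFill (pvIdxs (fun c => !PySem.Chars.isalpha c) cs) ss
      (pvFill (pvIdxs PySem.Chars.isalpha cs) ls
        (List.replicate cs.length (none : Option Char)))
    = (pvMerge cs ls ss).map some := by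
  induction cs generalizing ls ss with
  | nil =>
    cases ls <;> cases ss <;> simp_all [pvIdxs, pvFill, pvMerge]
  | cons c cs ih =>
    by_cases hp : PySem.Chars.isalpha c
    · have hp' : (fun c => !PySem.Chars.isalpha c) c = false := by simp [hp]
      cases ls with
      | nil => simp [hp] at hl
      | cons l ls' =>
        have e1 : pvIdxs PySem.Chars.isalpha (c :: cs)
            = 0 :: (pvIdxs PySem.Chars.isalpha cs).map (· + 1) := by simp [pvIdxs, hp]
        have e2 : pvIdxs (fun c => !PySem.Chars.isalpha c) (c :: cs)
            = (pvIdxs (fun c => !PySem.Chars.isalpha c) cs).map (· + 1) := by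
          simp [pvIdxs, hp]
        rw [e1, e2]
        simp only [List.length_cons, List.replicate_succ, pvFill, Int.toNat_zero,
          List.set_cons_zero]
        rw [pvFill_shift _ _ _ _ (pvIdxs_nonneg _ cs),
            pvFill_shift _ _ _ _ (pvIdxs_nonneg _ cs)]
        simp only [pvMerge, hp, if_pos, List.map_cons, List.cons.injEq, true_and]
        exact ih ls' ss (by simpa [hp] using hl) (by simpa [hp] using hs)
    · have hp' : (fun c => !PySem.Chars.isalpha c) c = true := by simp [hp]
      cases ss with
      | nil => simp [hp] at hs
      | cons v ss' =>
        have e1 : pvIdxs PySem.Chars.isalpha (c :: cs)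
            = (pvIdxs PySem.Chars.isalpha cs).map (· + 1) := by simp [pvIdxs, hp]
        have e2 : pvIdxs (fun c => !PySem.Chars.isalpha c) (c :: cs)
            = 0 :: (pvIdxs (fun c => !PySem.Chars.isalpha c) cs).map (· + 1) := by
          simp [pvIdxs, hp]
        rw [e1, e2]
        simp only [List.length_cons, List.replicate_succ]
        rw [pvFill_shift _ _ _ _ (pvIdxs_nonneg _ cs)]
        simp only [pvFill, Int.toNat_zero, List.set_cons_zero]
        rw [pvFill_shift _ _ _ _ (pvIdxs_nonneg _ cs)]
        simp only [pvMerge, hp, Bool.false_eq_true, if_neg, not_false_iff,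
          List.map_cons, List.cons.injEq, true_and]
        exact ih ls ss' (by simpa [hp] using hl) (by simpa [hp] using hs)

-- A's value in canonical form
theorem pvA_eq (s : String) :
    reverseByType s
      = String.mk (pvMerge s.toList
          ((s.toList.filter PySem.Chars.isalpha).reverse)
          ((s.toList.filter (fun c => !PySem.Chars.isalpha c)).reverse)) := by
  set cs := s.toList with hcs
  simp only [reverseByType, pvCollect, ← hcs]
  rw [pvCollect_spec]
  simp only
  rw [pvEnum_idx PySem.Chars.isalpha, pvEnum_idx (fun c => !PySem.Chars.isalpha c),
      pvEnum_val PySem.Chars.isalpha, pvEnum_val (fun c => !PySem.Chars.isalpha c)]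
  have hid : ∀ q : Char → Bool, (pvIdxs q cs).map (· + (0 : Int)) = pvIdxs q cs := by
    intro q
    rw [show ((· + (0 : Int)) : Int → Int) = id by funext x; simp, List.map_id]
  rw [hid, hid]
  simp only [List.nil_append]
  rw [pvMain cs ((cs.filter PySem.Chars.isalpha).reverse)
        ((cs.filter (fun c => !PySem.Chars.isalpha c)).reverse)
        (by simp) (by simp)]
  simp [List.filterMap_map]

-- ---- B side: the two-pointer pass reverses the selected subsequence in place ----

theorem pvGetD_mid (pre rest : List Char) (c : Char) :
    (pre ++ c :: rest).getD pre.length ' ' = c := by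
  induction pre with
  | nil => rfl
  | cons p pre ih => simpa using ih

theorem pvSet_mid (pre rest : List Char) (c x : Char) :
    (pre ++ c :: rest).set pre.length x = pre ++ x :: rest := by
  induction pre with
  | nil => rfl
  | cons p pre ih => simpa using ih

theorem pvSub_append (q : Char → Bool) (xs : List Char) :
    ∀ ys rs1 rs2, (xs.filter q).length = rs1.length →
      pvSub q (xs ++ ys) (rs1 ++ rs2) = pvSub q xs rs1 ++ pvSub q ys rs2 := by
  induction xs with
  | nil =>
    intro ys rs1 rs2 h
    cases rs1 with
    | nil => rfl
    | cons _ _ => simp at h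
  | cons c cs ih =>
    intro ys rs1 rs2 h
    by_cases hq : q c
    · cases rs1 with
      | nil => simp [List.filter_cons, hq] at h
      | cons r rs1' =>
        simp only [List.cons_append, pvSub, hq, if_pos]
        rw [ih ys rs1' rs2 (by simpa [List.filter_cons, hq] using h)]
    · simp only [List.cons_append, pvSub, hq, Bool.false_eq_true, if_neg, not_false_iff]
      rw [ih ys rs1 rs2 (by simpa [List.filter_cons, hq] using h)]

theorem pvSub_filter_not (q : Char → Bool) (cs : List Char) :
    ∀ rs, (∀ a ∈ rs, q a = true) →
      (pvSub q cs rs).filter (fun c => !q c) = cs.filter (fun c => !q c) := by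
  induction cs with
  | nil => intro rs _; rfl
  | cons c cs ih =>
    intro rs hrs
    by_cases hq : q c
    · cases rs with
      | nil => simp [pvSub, hq, List.filter_cons, ih [] (by simp)]
      | cons r rs' =>
        have hr : q r = true := hrs r (List.mem_cons_self ..)
        simp [pvSub, hq, List.filter_cons, hr,
          ih rs' (fun a ha => hrs a (List.mem_cons_of_mem _ ha))]
    · simp [pvSub, hq, List.filter_cons, ih rs hrs]

-- the central invariant: running the two-pointer loop on the segment [pre.length, pre.length+mid.length-1]
-- of pre ++ mid ++ post reverses the non-skipped subsequence of mid in place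
theorem pvPass_seg (skip : Char → Bool) :
    ∀ (n : Nat) (mid pre post : List Char), mid.length = n →
      pvPass skip (pre ++ mid ++ post) pre.length (pre.length + mid.length - 1)
        = pre ++ pvSub (fun c => !skip c) mid
            ((mid.filter (fun c => !skip c)).reverse) ++ post := by
  intro n
  induction n using Nat.strong_induction_on with
  | _ n ih =>
    intro mid pre post hlen
    match n, mid, hlen with
    | 0, [], _ =>
      rw [pvPass]
      simp [pvSub]
    | 1, [c], _ =>
      rw [pvPass]
      simp only [List.length_cons, List.length_nil]
      rw [if_neg (by omega)]
      by_cases hq : skip c <;>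
        simp [pvSub, List.filter_cons, hq]
    | (m + 2), c :: ms, hlen =>
      have hms : ms ≠ [] := by
        intro h; rw [h] at hlen; simp at hlen
      obtain ⟨ms', d, hcon⟩ := (List.eq_nil_or_concat ms).resolve_left hms
      rw [List.concat_eq_append] at hcon
      subst hcon
      have hm' : ms'.length = m := by
        simp at hlen; omega
      set q : Char → Bool := fun c => !skip c with hqdef
      have harr : pre ++ (c :: (ms' ++ [d])) ++ post
          = pre ++ c :: (ms' ++ d :: post) := by simp
      have harr2 : pre ++ (c :: (ms' ++ [d])) ++ post
          = (pre ++ c :: ms') ++ d :: post := by simp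
      have hj : pre.length + (c :: (ms' ++ [d])).length - 1
          = (pre ++ c :: ms').length := by simp <;> omega
      rw [pvPass]
      rw [if_pos (by simp <;> omega)]
      have hgi : (pre ++ (c :: (ms' ++ [d])) ++ post).getD pre.length ' ' = c := by
        rw [harr]; exact pvGetD_mid pre _ c
      have hgj : (pre ++ (c :: (ms' ++ [d])) ++ post).getD
          (pre.length + (c :: (ms' ++ [d])).length - 1) ' ' = d := by
        rw [hj, harr2]; exact pvGetD_mid (pre ++ c :: ms') post d
      rw [hgi, hgj]
      by_cases hc : skip c
      · rw [if_pos hc]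
        have e : pre ++ (c :: (ms' ++ [d])) ++ post
            = (pre ++ [c]) ++ (ms' ++ [d]) ++ post := by simp
        have el : pre.length + 1 = (pre ++ [c]).length := by simp
        have ej : pre.length + (c :: (ms' ++ [d])).length - 1
            = (pre ++ [c]).length + (ms' ++ [d]).length - 1 := by simp <;> omega
        rw [e, el, ej, ih (m + 1) (by omega) (ms' ++ [d]) (pre ++ [c]) post (by simp <;> omega)]
        have hsub : pvSub q (c :: (ms' ++ [d]))
            (((c :: (ms' ++ [d])).filter q).reverse)
            = c :: pvSub q (ms' ++ [d]) (((ms' ++ [d]).filter q).reverse) := by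
          have hqc : q c = false := by simp [hqdef, hc]
          simp [pvSub, hqc, List.filter_cons]
        rw [hsub]; simp
      · rw [if_neg hc]
        by_cases hd : skip d
        · rw [if_pos hd]
          have ej : pre.length + (c :: (ms' ++ [d])).length - 1 - 1
              = pre.length + (c :: ms').length - 1 := by simp <;> omega
          have e : pre ++ (c :: (ms' ++ [d])) ++ post
              = pre ++ (c :: ms') ++ (d :: post) := by simp
          rw [ej, e, ih (m + 1) (by omega) (c :: ms') pre (d :: post) (by simp <;> omega)]
          have hqd : q d = false := by simp [hqdef, hd]
          have hfil : (c :: (ms' ++ [d])).filter q = (c :: ms').filter q := by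
            simp [List.filter_cons, List.filter_append, hqd]
          have hsub : pvSub q (c :: (ms' ++ [d]))
              (((c :: (ms' ++ [d])).filter q).reverse)
              = pvSub q (c :: ms') (((c :: ms').filter q).reverse) ++ [d] := by
            rw [hfil]
            have happ := pvSub_append q (c :: ms') [d]
              (((c :: ms').filter q).reverse) [] (by simp)
            rw [List.append_nil] at happ
            have hd1 : pvSub q [d] [] = [d] := by simp [pvSub, hqd]
            rw [hd1] at happ
            simpa using happ
          rw [hsub]; simp
        · rw [if_neg hd]
          have hqc : q c = true := by simp [hqdef, hc]
          have hqd : q d = true := by simp [hqdef, hd]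
          -- the swap
          have hset1 : (pre ++ (c :: (ms' ++ [d])) ++ post).set pre.length d
              = pre ++ d :: (ms' ++ d :: post) := by
            rw [harr]; exact pvSet_mid pre _ c d
          have hset2 : (pre ++ d :: (ms' ++ d :: post)).set
              (pre.length + (c :: (ms' ++ [d])).length - 1) c
              = (pre ++ d :: ms') ++ c :: post := by
            have hj2 : pre.length + (c :: (ms' ++ [d])).length - 1
                = (pre ++ d :: ms').length := by simp <;> omega
            have e2 : pre ++ d :: (ms' ++ d :: post)
                = (pre ++ d :: ms') ++ d :: post := by simp
            rw [hj2, e2]; exact pvSet_mid (pre ++ d :: ms') post d c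
          rw [hset1, hset2]
          have e3 : (pre ++ d :: ms') ++ c :: post
              = (pre ++ [d]) ++ ms' ++ (c :: post) := by simp
          have el : pre.length + 1 = (pre ++ [d]).length := by simp
          have ej : pre.length + (c :: (ms' ++ [d])).length - 1 - 1
              = (pre ++ [d]).length + ms'.length - 1 := by simp <;> omega
          rw [e3, el, ej, ih m (by omega) ms' (pre ++ [d]) (c :: post) hm']
          have hfil : (c :: (ms' ++ [d])).filter q
              = c :: (ms'.filter q ++ [d]) := by
            simp [List.filter_cons, List.filter_append, hqc, hqd]
          have hsub : pvSub q (c :: (ms' ++ [d]))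
              (((c :: (ms' ++ [d])).filter q).reverse)
              = d :: (pvSub q ms' ((ms'.filter q).reverse) ++ [c]) := by
            rw [hfil]
            have hrev : (c :: (ms'.filter q ++ [d])).reverse
                = d :: ((ms'.filter q).reverse ++ [c]) := by simp
            rw [hrev]
            simp only [pvSub, hqc, if_pos, List.cons.injEq, true_and]
            have happ := pvSub_append q ms' [d] ((ms'.filter q).reverse) [c] (by simp)
            have hd1 : pvSub q [d] [c] = [c] := by simp [pvSub, hqd]
            rw [hd1] at happ
            simpa using happ
          rw [hsub]; simp

theorem pvPass_full (skip : Char → Bool) (cs : List Char) :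
    pvPass skip cs 0 (cs.length - 1)
      = pvSub (fun c => !skip c) cs ((cs.filter (fun c => !skip c)).reverse) := by
  have := pvPass_seg skip cs.length cs [] [] rfl
  simpa using this

theorem pvSubSub_merge (cs : List Char) :
    ∀ ls ss, ls.length = (cs.filter PySem.Chars.isalpha).length →
      (∀ a ∈ ls, PySem.Chars.isalpha a = true) →
      ss.length = (cs.filter (fun c => !PySem.Chars.isalpha c)).length →
      pvSub (fun c => !PySem.Chars.isalpha c)
        (pvSub (fun c => PySem.Chars.isalpha c) cs ls) ss
      = pvMerge cs ls ss := by
  induction cs with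
  | nil =>
    intro ls ss hl _ hs
    cases ls with
    | nil => cases ss <;> simp_all [pvSub, pvMerge]
    | cons _ _ => simp at hl
  | cons c cs ih =>
    intro ls ss hl hq hs
    by_cases hc : PySem.Chars.isalpha c
    · cases ls with
      | nil => simp [List.filter_cons, hc] at hl
      | cons l ls' =>
        have hql : PySem.Chars.isalpha l = true := hq l (List.mem_cons_self ..)
        simp only [pvSub, hc, if_pos]
        simp only [pvSub, hql, Bool.not_true, Bool.false_eq_true, if_neg, not_false_iff]
        rw [ih ls' ss (by simpa [List.filter_cons, hc] using hl)
            (fun a ha => hq a (List.mem_cons_of_mem _ ha))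
            (by simpa [List.filter_cons, hc] using hs)]
        simp [pvMerge, hc]
    · cases ss with
      | nil => simp [List.filter_cons, hc] at hs
      | cons v ss' =>
        simp only [pvSub, hc, Bool.false_eq_true, if_neg, not_false_iff, Bool.not_false,
          if_pos]
        rw [ih ls ss' (by simpa [List.filter_cons, hc] using hl) hq
            (by simpa [List.filter_cons, hc] using hs)]
        simp [pvMerge, hc]

theorem pvB_eq (s : String) :
    reverseByType_alt s
      = String.mk (pvMerge s.toList
          ((s.toList.filter PySem.Chars.isalpha).reverse)
          ((s.toList.filter (fun c => !PySem.Chars.isalpha c)).reverse)) := by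
  set cs := s.toList with hcs
  simp only [reverseByType_alt, ← hcs]
  rw [pvPass_full, pvPass_full]
  have hnn : (fun c => !!PySem.Chars.isalpha c) = (fun c => PySem.Chars.isalpha c) := by
    funext c; simp
  rw [hnn]
  set lits := (cs.filter (fun c => PySem.Chars.isalpha c)).reverse with hlits
  set cs1 := pvSub (fun c => PySem.Chars.isalpha c) cs lits with hcs1
  have hfil : cs1.filter (fun c => !PySem.Chars.isalpha c)
      = cs.filter (fun c => !PySem.Chars.isalpha c) := by
    rw [hcs1]
    exact pvSub_filter_not _ cs lits (by
      intro a ha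
      rw [hlits] at ha
      have := List.mem_filter.1 (List.mem_reverse.1 ha)
      exact this.2)
  rw [hfil]
  rw [pvSubSub_merge cs lits _
      (by simp [hlits])
      (by intro a ha; rw [hlits] at ha
          exact (List.mem_filter.1 (List.mem_reverse.1 ha)).2)
      (by simp)]

-- ===== VERDICT (by name: the statement is the Claim_ definition above) =====
theorem reverseByType_spec : Claim_equal_reverseByType := by
  intro s _
  unfold Spec_reverseByType
  rw [pvA_eq, pvB_eq]
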